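-- pv_equiv track=rewrite | github.com/jakobderaaij/banzhaf-variants | find_all_wvgs_at_quota.py | get_maximal_loosing_coalitions
-- ===== SOURCE A (Python) =====
-- def is_subset_of(subset,set_):
--     for ele in subset:
--         if ele not in set_:
--             return False
--     return True
--
-- def get_maximal_loosing_coalitions(loosing):
--     critical = []
--     for coalition in loosing:
--         is_critical = True
--         for other_coalition in loosing:
--             if other_coalition != coalition and is_subset_of(coalition, other_coalition):
--                 is_critical = False
--         if is_critical: critical.append(coalition)
--     return critical
-- ===== SOURCE B (Python) =====
-- def get_maximal_loosing_coalitions(loosing):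
--     # Inverted index: element value -> set of indices of coalitions containing it.
--     index = {}
--     for i, coalition in enumerate(loosing):
--         for e in coalition:
--             index[e] = index.get(e, set()) | {i}
--     universe = set(range(len(loosing)))
--     result = []
--     for coalition in loosing:
--         candidate = universe
--         for e in coalition:
--             candidate = candidate & index.get(e, set())
--         # candidate = indices of all membership-supersets of coalition (incl. itself)
--         if all(loosing[j] == coalition for j in candidate):
--             result.append(coalition)
--     return result
-- ===== Notes on version B (the rewrite author's own statement) =====
-- stated objective: faster
-- what changed: Replaces A's all-pairs subset scan (every coalition tested element-by-element against every other coalition) by an inverted index from element value to the set of indices of coalitions containing it; each coalition's membership-supersets are then found by intersecting its elements' index sets, and it is kept iff every such superset equals it by value.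
import Mathlib
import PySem

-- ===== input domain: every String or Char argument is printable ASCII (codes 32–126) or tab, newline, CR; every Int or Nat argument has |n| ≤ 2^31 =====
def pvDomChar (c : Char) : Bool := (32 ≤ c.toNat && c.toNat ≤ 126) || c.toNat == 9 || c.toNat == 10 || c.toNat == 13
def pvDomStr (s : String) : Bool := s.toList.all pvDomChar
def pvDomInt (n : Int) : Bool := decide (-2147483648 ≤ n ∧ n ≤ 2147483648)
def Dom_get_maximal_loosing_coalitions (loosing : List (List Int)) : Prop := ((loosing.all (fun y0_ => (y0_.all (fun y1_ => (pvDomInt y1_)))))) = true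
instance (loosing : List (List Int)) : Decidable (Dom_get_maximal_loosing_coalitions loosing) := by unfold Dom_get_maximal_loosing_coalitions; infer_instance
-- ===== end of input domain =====

-- B replaces A's all-pairs subset scan by an inverted index (element -> set of indices of
-- coalitions containing it) and per-coalition set intersections; same return value. (objective: alternative)

-- ===== PORT A =====
-- the for-loop with early 'return False' is exactly List.all
def is_subset_of (subset : List Int) (set_ : List Int) : Bool :=
  subset.all (fun ele => set_.contains ele)

def get_maximal_loosing_coalitions (loosing : List (List Int)) : List (List Int) :=
  loosing.foldl (fun critical coalition =>
    let is_critical := loosing.foldl (fun b other_coalition =>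
      if other_coalition != coalition && is_subset_of coalition other_coalition then false else b) true
    if is_critical then critical ++ [coalition] else critical) []

-- ===== PORT B =====
-- index = {}; for i, coalition in enumerate(loosing): for e in coalition: index[e] = index.get(e, set()) | {i}
def pvBuildIndex (loosing : List (List Int)) : PySem.Dict Int (PySem.Set Int) :=
  (PySem.List.enumerate loosing 0).foldl (fun index p =>
    p.2.foldl (fun index e =>
      index.insert e (PySem.Set.union (index.getD e PySem.Set.empty) (PySem.Set.add PySem.Set.empty p.1))) index)
    PySem.Dict.empty

-- 'loosing[j]' with j drawn from 'universe' is always in range, so the total form pyGetD is exact here;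
-- all(...) over the set 'candidate' is order-insensitive, so consuming the Set's elements is exact.
def get_maximal_loosing_coalitions_alt (loosing : List (List Int)) : List (List Int) :=
  let index := pvBuildIndex loosing
  let univ : PySem.Set Int := PySem.Set.ofList (PySem.List.pyRange 0 loosing.length 1)  -- 'universe' is a Lean keyword
  loosing.foldl (fun result coalition =>
    let candidate := coalition.foldl (fun s e => PySem.Set.inter s (index.getD e PySem.Set.empty)) univ
    if candidate.all (fun j => PySem.List.pyGetD loosing j [] == coalition) then result ++ [coalition]
    else result) []

-- ===== PRECONDITION & SPEC =====
def Spec_get_maximal_loosing_coalitions (loosing : List (List Int)) (out : List (List Int)) : Prop := out = get_maximal_loosing_coalitions_alt loosing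
instance (loosing : List (List Int)) (out : List (List Int)) : Decidable (Spec_get_maximal_loosing_coalitions loosing out) := by unfold Spec_get_maximal_loosing_coalitions; infer_instance

-- ===== CLAIM (what is proved, stated in full; the proofs are below) =====
def Claim_equal_get_maximal_loosing_coalitions : Prop := ∀ (loosing : List (List Int)), Dom_get_maximal_loosing_coalitions loosing → Spec_get_maximal_loosing_coalitions loosing (get_maximal_loosing_coalitions loosing)

-- ===== LEMMAS AND PROOFS =====

-- A's inner flag loop: once a dominating coalition is seen the flag stays false
lemma pvFlag_eq (c : List Int) (l : List (List Int)) (b : Bool) :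
    l.foldl (fun b o => if o != c && is_subset_of c o then false else b) b
      = (b && l.all (fun o => !(o != c && is_subset_of c o))) := by
  induction l generalizing b with
  | nil => simp
  | cons o l ih =>
    simp only [List.foldl_cons, List.all_cons, ih]
    by_cases h : (o != c && is_subset_of c o) = true <;> simp [h]

-- membership in the dict built by one coalition's inner loop
lemma pvInner_mem (es : List Int) (d : PySem.Dict Int (PySem.Set Int)) (v e : Int) (i : Int) :
    i ∈ (es.foldl (fun d e' =>
        d.insert e' (PySem.Set.union (d.getD e' PySem.Set.empty) (PySem.Set.add PySem.Set.empty v))) d).getD e PySem.Set.empty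
      ↔ i ∈ d.getD e PySem.Set.empty ∨ (e ∈ es ∧ i = v) := by
  induction es generalizing d with
  | nil => simp
  | cons e' es ih =>
    simp only [List.foldl_cons, ih, PySem.Dict.getD_insert, List.mem_cons]
    rcases eq_or_ne e e' with h | h
    · subst h
      simp [PySem.Set.mem_union, PySem.Set.empty]
      tauto
    · simp [h]

-- membership in the inverted index built from a list of (index, coalition) pairs
lemma pvIndex_mem_gen (ps : List (Int × List Int)) (d : PySem.Dict Int (PySem.Set Int)) (e i : Int) :
    i ∈ (ps.foldl (fun index p =>
        p.2.foldl (fun index e' =>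
          index.insert e' (PySem.Set.union (index.getD e' PySem.Set.empty) (PySem.Set.add PySem.Set.empty p.1))) index) d).getD e PySem.Set.empty
      ↔ i ∈ d.getD e PySem.Set.empty ∨ ∃ p ∈ ps, e ∈ p.2 ∧ i = p.1 := by
  induction ps generalizing d with
  | nil => simp
  | cons p ps ih =>
    simp only [List.foldl_cons, ih, pvInner_mem, List.mem_cons]
    constructor
    · rintro (⟨h | ⟨he, hv⟩⟩ | ⟨q, hq, hqe, hqi⟩)
      · exact Or.inl h
      · exact Or.inr ⟨p, Or.inl rfl, he, hv⟩
      · exact Or.inr ⟨q, Or.inr hq, hqe, hqi⟩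
    · rintro (h | ⟨q, (rfl | hq), hqe, hqi⟩)
      · exact Or.inl (Or.inl h)
      · exact Or.inl (Or.inr ⟨hqe, hqi⟩)
      · exact Or.inr ⟨q, hq, hqe, hqi⟩

lemma pvIndex_mem (loosing : List (List Int)) (e i : Int) :
    i ∈ (pvBuildIndex loosing).getD e PySem.Set.empty
      ↔ ∃ (k : Nat) (_ : k < loosing.length), e ∈ loosing[k] ∧ i = (k : Int) := by
  unfold pvBuildIndex
  rw [pvIndex_mem_gen]
  constructor
  · rintro (h | ⟨p, hp, hpe, hpi⟩)
    · exact absurd h (by simp [PySem.Dict.empty, PySem.Dict.getD, PySem.Dict.get?, PySem.Set.empty])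
    · rcases (PySem.List.mem_enumerate_iff loosing 0 p).mp hp with ⟨k, hk, rfl⟩
      exact ⟨k, hk, hpe, by simpa using hpi⟩
  · rintro ⟨k, hk, he, rfl⟩
    exact Or.inr ⟨((k : Int), loosing[k]), (PySem.List.mem_enumerate_iff loosing 0 _).mpr ⟨k, hk, by simp⟩, he, rfl⟩

-- membership in B's per-coalition intersection
lemma pvCand_mem (c : List Int) (index : PySem.Dict Int (PySem.Set Int)) (s : PySem.Set Int) (i : Int) :
    i ∈ c.foldl (fun s e => PySem.Set.inter s (index.getD e PySem.Set.empty)) s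
      ↔ i ∈ s ∧ ∀ e ∈ c, i ∈ index.getD e PySem.Set.empty := by
  induction c generalizing s with
  | nil => simp
  | cons e c ih =>
    simp only [List.foldl_cons, ih, PySem.Set.mem_inter, List.mem_cons]
    constructor
    · rintro ⟨⟨hs, hi⟩, h⟩
      exact ⟨hs, fun e' he' => he'.elim (fun h' => h' ▸ hi) (h e')⟩
    · rintro ⟨hs, h⟩
      exact ⟨⟨hs, h e (Or.inl rfl)⟩, fun e' he' => h e' (Or.inr he')⟩

-- the common characterisation: "every coalition that contains all of c's elements equals c"
def pvMaximal (loosing : List (List Int)) (c : List Int) : Prop :=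
  ∀ (k : Nat) (_ : k < loosing.length), (∀ e ∈ c, e ∈ loosing[k]) → loosing[k] = c

lemma pvA_char (loosing : List (List Int)) (c : List Int) :
    loosing.all (fun o => !(o != c && is_subset_of c o)) = true ↔ pvMaximal loosing c := by
  have hstep : ∀ o : List Int, (!(o != c && is_subset_of c o)) = true ↔ ((∀ e ∈ c, e ∈ o) → o = c) := by
    intro o
    by_cases h : o = c
    · simp [h]
    · simp [h, is_subset_of, List.all_eq_false]
  simp only [List.all_eq_true, hstep, pvMaximal]
  constructor
  · intro h k hk hsub
    exact h loosing[k] (List.getElem_mem hk) hsub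
  · intro h o ho hsub
    rcases List.mem_iff_getElem.mp ho with ⟨k, hk, rfl⟩
    exact h k hk hsub

lemma pvB_char (loosing : List (List Int)) (c : List Int) :
    ((c.foldl (fun s e => PySem.Set.inter s ((pvBuildIndex loosing).getD e PySem.Set.empty))
        (PySem.Set.ofList (PySem.List.pyRange 0 loosing.length 1))).all
      (fun j => PySem.List.pyGetD loosing j [] == c)) = true ↔ pvMaximal loosing c := by
  simp only [List.all_eq_true, pvCand_mem, PySem.Set.mem_ofList, PySem.List.mem_pyRange_one,
    beq_iff_eq, pvMaximal]
  constructor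
  · intro h k hk hsub
    have hm : ∀ e ∈ c, (k : Int) ∈ (pvBuildIndex loosing).getD e PySem.Set.empty :=
      fun e he => (pvIndex_mem loosing e _).mpr ⟨k, hk, hsub e he, rfl⟩
    have h2 := h (k : Int) ⟨⟨by positivity, by exact_mod_cast hk⟩, hm⟩
    rwa [PySem.List.pyGetD_natCast, List.getD_eq_getElem _ _ hk] at h2
  · rintro h i ⟨⟨h0, hn⟩, hm⟩
    have hk : i.toNat < loosing.length := by omega
    have hic : i = (i.toNat : Int) := by omega
    have hsub : ∀ e ∈ c, e ∈ loosing[i.toNat] := by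
      intro e he
      rcases (pvIndex_mem loosing e i).mp (hm e he) with ⟨k', hk', he', hi'⟩
      have : k' = i.toNat := by omega
      simpa [this] using he'
    rw [hic, PySem.List.pyGetD_natCast, List.getD_eq_getElem _ _ hk]
    exact h i.toNat hk hsub

-- the two per-coalition keep-tests agree
lemma pvKeep_eq (loosing : List (List Int)) (c : List Int) :
    (c.foldl (fun s e => PySem.Set.inter s ((pvBuildIndex loosing).getD e PySem.Set.empty))
        (PySem.Set.ofList (PySem.List.pyRange 0 loosing.length 1))).all
      (fun j => PySem.List.pyGetD loosing j [] == c)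
      = loosing.all (fun o => !(o != c && is_subset_of c o)) := by
  rw [Bool.eq_iff_iff, pvA_char, pvB_char]

-- ===== VERDICT (by name: the statement is the Claim_ definition above) =====
theorem get_maximal_loosing_coalitions_spec : Claim_equal_get_maximal_loosing_coalitions := by
  intro loosing _
  unfold Spec_get_maximal_loosing_coalitions
  unfold get_maximal_loosing_coalitions get_maximal_loosing_coalitions_alt
  simp only [pvFlag_eq, Bool.true_and, pvKeep_eq]
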